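-- pv_equiv track=rewrite | github.com/theinfosecguy/razin | src/razin/scanner/mcp_remote.py | _find_server_url_evidence
-- ===== SOURCE A (Python) =====
-- def _find_server_url_evidence(lines: list[str], server_name: str, endpoint_url: str) -> tuple[int | None, str]:
--     """Find best-effort line/snippet evidence for a server URL in `.mcp.json` text."""
--     server_token = f'"{server_name}"'
--
--     server_index: int | None = None
--     for index, line in enumerate(lines, start=1):
--         if server_token in line:
--             server_index = index
--             break
--
--     if server_index is not None:
--         for index in range(server_index, len(lines) + 1):
--             line = lines[index - 1]
--             if '"url"' in line and endpoint_url in line: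
--                 return index, line.strip()
--
--     for index, line in enumerate(lines, start=1):
--         if endpoint_url in line:
--             return index, line.strip()
--
--     return None, endpoint_url
-- ===== SOURCE B (Python) =====
-- def _find_server_url_evidence(lines: list[str], server_name: str, endpoint_url: str) -> tuple[int | None, str]:
--     """Single pass: arm on the server token, return the first url+endpoint line
--     once armed (it always wins), otherwise remember the first endpoint-only line."""
--     server_token = f'"{server_name}"'
--     seen = False
--     endpoint_evidence = None
--     for index, line in enumerate(lines, start=1):
--         if not seen and server_token in line:
--             seen = True
--         if seen and '"url"' in line and endpoint_url in line:
--             return index, line.strip()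
--         if endpoint_evidence is None and endpoint_url in line:
--             endpoint_evidence = (index, line.strip())
--     return endpoint_evidence if endpoint_evidence is not None else (None, endpoint_url)
-- ===== Notes on version B (the rewrite author's own statement) =====
-- stated objective: alternative
-- what changed: A's three sequential scans (find server line, scan from it for a url+endpoint line, rescan all for any endpoint line) are folded into one pass over enumerated lines that arms a 'seen' flag at the server token, returns immediately on an armed url+endpoint match, and remembers the first endpoint-only line as fallback.
import Mathlib
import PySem

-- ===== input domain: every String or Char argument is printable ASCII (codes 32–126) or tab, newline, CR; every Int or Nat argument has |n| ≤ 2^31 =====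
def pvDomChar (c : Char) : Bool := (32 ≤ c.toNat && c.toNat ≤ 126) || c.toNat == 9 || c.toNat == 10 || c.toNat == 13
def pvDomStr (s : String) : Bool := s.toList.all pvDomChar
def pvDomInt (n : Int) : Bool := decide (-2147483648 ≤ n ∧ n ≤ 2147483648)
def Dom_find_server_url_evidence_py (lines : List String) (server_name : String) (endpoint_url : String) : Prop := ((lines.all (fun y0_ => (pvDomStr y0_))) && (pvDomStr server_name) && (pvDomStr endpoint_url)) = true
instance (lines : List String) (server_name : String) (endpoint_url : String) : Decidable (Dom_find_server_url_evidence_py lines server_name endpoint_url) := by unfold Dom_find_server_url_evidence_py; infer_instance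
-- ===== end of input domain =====

-- B replaces A's three sequential scans by one pass with an armed flag and a remembered
-- first endpoint-only match (objective: alternative decomposition, single traversal).

-- ===== PORT A =====
-- first `for index, line in enumerate(lines, start=1): if server_token in line: … break`
def pvPassOne (lines : List String) (tok : String) (i : Int) : Option Int :=
  match lines with
  | [] => none
  | l :: rest => if PySem.Str.isIn tok l then some i else pvPassOne rest tok (i + 1)

-- `for index in range(server_index, len(lines)+1): line = lines[index-1]; …` — the scan over
-- lines[server_index-1:] carrying the absolute 1-based index (same lines, same order, same index)
def pvPassTwo (lines : List String) (i : Int) (ep : String) : Option (Int × String) :=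
  match lines with
  | [] => none
  | l :: rest =>
    if PySem.Str.isIn "\"url\"" l && PySem.Str.isIn ep l then some (i, PySem.Str.strip l)
    else pvPassTwo rest (i + 1) ep

-- last `for index, line in enumerate(lines, start=1): if endpoint_url in line: return …`
def pvPassThree (lines : List String) (i : Int) (ep : String) : Option (Int × String) :=
  match lines with
  | [] => none
  | l :: rest =>
    if PySem.Str.isIn ep l then some (i, PySem.Str.strip l) else pvPassThree rest (i + 1) ep

def find_server_url_evidence_py (lines : List String) (server_name : String) (endpoint_url : String) : Option Int × String :=
  let server_token := "\"" ++ server_name ++ "\""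
  match pvPassOne lines server_token 1 with
  | some si =>
      match pvPassTwo (lines.drop (si - 1).toNat) si endpoint_url with
      | some (j, s) => (some j, s)
      | none =>
          match pvPassThree lines 1 endpoint_url with
          | some (j, s) => (some j, s)
          | none => (none, endpoint_url)
  | none =>
      match pvPassThree lines 1 endpoint_url with
      | some (j, s) => (some j, s)
      | none => (none, endpoint_url)

-- ===== PORT B =====
-- the single loop of Source B: state = (seen, endpoint_evidence), early return on an armed url match
def pvAltLoop (lines : List String) (i : Int) (tok : String) (ep : String) (seen : Bool) (epEv : Option (Int × String)) : Option Int × String :=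
  match lines with
  | [] =>
      match epEv with
      | some (j, s) => (some j, s)
      | none => (none, ep)
  | l :: rest =>
    let seen' := seen || PySem.Str.isIn tok l
    if seen' && (PySem.Str.isIn "\"url\"" l && PySem.Str.isIn ep l) then (some i, PySem.Str.strip l)
    else
      pvAltLoop rest (i + 1) tok ep seen'
        (match epEv with
         | some e => some e
         | none => if PySem.Str.isIn ep l then some (i, PySem.Str.strip l) else none)

def find_server_url_evidence_py_alt (lines : List String) (server_name : String) (endpoint_url : String) : Option Int × String :=
  pvAltLoop lines 1 ("\"" ++ server_name ++ "\"") endpoint_url false none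

-- ===== PRECONDITION & SPEC =====
def Spec_find_server_url_evidence_py (lines : List String) (server_name : String) (endpoint_url : String) (out : Option Int × String) : Prop := out = find_server_url_evidence_py_alt lines server_name endpoint_url
instance (lines : List String) (server_name : String) (endpoint_url : String) (out : Option Int × String) : Decidable (Spec_find_server_url_evidence_py lines server_name endpoint_url out) := by unfold Spec_find_server_url_evidence_py; infer_instance

-- ===== CLAIM (what is proved, stated in full; the proofs are below) =====
def Claim_equal_find_server_url_evidence_py : Prop := ∀ (lines : List String) (server_name : String) (endpoint_url : String), Dom_find_server_url_evidence_py lines server_name endpoint_url → Spec_find_server_url_evidence_py lines server_name endpoint_url (find_server_url_evidence_py lines server_name endpoint_url)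

-- ===== LEMMAS AND PROOFS =====

-- fallback: whichever endpoint evidence is available first, else (None, endpoint_url)
def pvFb (epEv p3 : Option (Int × String)) (ep : String) : Option Int × String :=
  match epEv.or p3 with
  | some (j, s) => (some j, s)
  | none => (none, ep)

-- folding one line's endpoint-evidence update into the suffix's pass-three scan
theorem pvFb_merge (epEv : Option (Int × String)) (l : String) (rest : List String) (i : Int) (ep : String) :
    pvFb (match epEv with
          | some e => some e
          | none => if PySem.Str.isIn ep l then some (i, PySem.Str.strip l) else none)
      (pvPassThree rest (i + 1) ep) ep
    = pvFb epEv (pvPassThree (l :: rest) i ep) ep := by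
  cases epEv with
  | some e => simp [pvFb, Option.or]
  | none =>
    simp only [pvPassThree, pvFb, Option.or]
    by_cases h : PySem.Str.isIn ep l = true
    · simp only [if_pos h]
    · simp only [if_neg h]

theorem pvAltLoop_seen (lines : List String) (i : Int) (tok ep : String) (epEv : Option (Int × String)) :
    pvAltLoop lines i tok ep true epEv
    = match pvPassTwo lines i ep with
      | some (j, s) => (some j, s)
      | none => pvFb epEv (pvPassThree lines i ep) ep := by
  induction lines generalizing i epEv with
  | nil => cases epEv <;> simp [pvAltLoop, pvPassTwo, pvPassThree, pvFb, Option.or]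
  | cons l rest ih =>
    simp only [pvAltLoop, pvPassTwo, Bool.true_or, Bool.true_and]
    by_cases h : (PySem.Str.isIn "\"url\"" l && PySem.Str.isIn ep l) = true
    · rw [if_pos h, if_pos h]
    · rw [if_neg h, if_neg h, ih]
      cases hPT : pvPassTwo rest (i + 1) ep with
      | some js => simp only [hPT]
      | none => simp only [hPT]; exact pvFb_merge epEv l rest i ep

theorem pvPassOne_ge (lines : List String) (tok : String) (i si : Int)
    (h : pvPassOne lines tok i = some si) : i ≤ si := by
  induction lines generalizing i with
  | nil => simp [pvPassOne] at h
  | cons l rest ih =>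
    simp only [pvPassOne] at h
    split at h
    · simp only [Option.some.injEq] at h; omega
    · have := ih (i + 1) h; omega

theorem pvAltLoop_unseen (lines : List String) (i : Int) (tok ep : String) (epEv : Option (Int × String)) :
    pvAltLoop lines i tok ep false epEv
    = match pvPassOne lines tok i with
      | some si =>
          match pvPassTwo (lines.drop (si - i).toNat) si ep with
          | some (j, s) => (some j, s)
          | none => pvFb epEv (pvPassThree lines i ep) ep
      | none => pvFb epEv (pvPassThree lines i ep) ep := by
  induction lines generalizing i epEv with
  | nil => cases epEv <;> simp [pvAltLoop, pvPassOne, pvPassThree, pvFb, Option.or]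
  | cons l rest ih =>
    cases hT : PySem.Str.isIn tok l with
    | true =>
      -- token found on this line: the rest is the armed case
      have h1 : pvPassOne (l :: rest) tok i = some i := by simp only [pvPassOne]; rw [if_pos hT]
      rw [h1]
      simp only [pvAltLoop, hT, Bool.false_or, Bool.true_and, Int.sub_self, Int.toNat_zero,
        List.drop_zero, pvPassTwo]
      by_cases h : (PySem.Str.isIn "\"url\"" l && PySem.Str.isIn ep l) = true
      · rw [if_pos h, if_pos h]
      · rw [if_neg h, if_neg h, pvAltLoop_seen]
        cases hPT : pvPassTwo rest (i + 1) ep with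
        | some js => simp only [hPT]
        | none => simp only [hPT]; exact pvFb_merge epEv l rest i ep
    | false =>
      simp only [pvAltLoop, pvPassOne, hT, Bool.false_or, Bool.false_and]
      rw [if_neg Bool.false_ne_true, if_neg Bool.false_ne_true, ih]
      cases hP : pvPassOne rest tok (i + 1) with
      | none => simp only [hP]; exact pvFb_merge epEv l rest i ep
      | some si =>
        have hge : i + 1 ≤ si := pvPassOne_ge rest tok (i + 1) si hP
        have hd : ((l :: rest).drop (si - i).toNat) = rest.drop (si - (i + 1)).toNat := by
          have hn : (si - i).toNat = (si - (i + 1)).toNat + 1 := by omega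
          rw [hn]; rfl
        simp only [hP, hd]
        cases hPT : pvPassTwo (rest.drop (si - (i + 1)).toNat) si ep with
        | some js => simp only [hPT]
        | none => simp only [hPT]; exact pvFb_merge epEv l rest i ep

-- ===== VERDICT (by name: the statement is the Claim_ definition above) =====
theorem find_server_url_evidence_py_spec : Claim_equal_find_server_url_evidence_py := by
  unfold Claim_equal_find_server_url_evidence_py
  intro lines server_name endpoint_url _
  unfold Spec_find_server_url_evidence_py
  simp only [find_server_url_evidence_py, find_server_url_evidence_py_alt]
  rw [pvAltLoop_unseen]
  cases hP : pvPassOne lines ("\"" ++ server_name ++ "\"") 1 with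
  | none =>
    simp only [hP]
    cases pvPassThree lines 1 endpoint_url <;> simp [pvFb, Option.or]
  | some si =>
    simp only [hP]
    cases hPT : pvPassTwo (lines.drop (si - 1).toNat) si endpoint_url with
    | some js => simp only [hPT]
    | none =>
      simp only [hPT]
      cases pvPassThree lines 1 endpoint_url <;> simp [pvFb, Option.or]
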